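-- pv_equiv track=rewrite | github.com/wtjiang98/ManiGAN-baseline | code/LGIE_datasets.py | build_dictionary_LGIE
-- ===== SOURCE A (Python) =====
-- from collections import defaultdict
--
-- def build_dictionary_LGIE(captions):
--   word_counts = defaultdict(float)
--   for sent in captions:
--     for word in sent:
--       word_counts[word] += 1
--
--   vocab = [w for w in word_counts if word_counts[w] >= 0]
--
--   ixtoword = {}
--   ixtoword[0] = '<end>'
--   wordtoix = {}
--   wordtoix['<end>'] = 0
--   ix = 1
--   for w in vocab:
--     wordtoix[w] = ix
--     ixtoword[ix] = w
--     ix += 1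
--
--   captions_new = []
--   for t in captions:
--     rev = []
--     for w in t:
--       if w in wordtoix:
--         rev.append(wordtoix[w])
--     # rev.append(0)  # do not need '<end>' token
--     captions_new.append(rev)
--
--   return [captions_new, ixtoword, wordtoix, len(ixtoword)]
-- ===== SOURCE B (Python) =====
-- def build_dictionary_LGIE(captions):
--   ixtoword = {0: '<end>'}
--   wordtoix = {'<end>': 0}
--   ix = 1
--   assigned = set()
--   captions_new = []
--   for sent in captions:
--     rev = []
--     for w in sent:
--       if w not in assigned:
--         wordtoix[w] = ix
--         ixtoword[ix] = w
--         assigned.add(w)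
--         ix += 1
--       rev.append(wordtoix[w])
--     captions_new.append(rev)
--   return [captions_new, ixtoword, wordtoix, len(ixtoword)]
-- ===== Notes on version B (the rewrite author's own statement) =====
-- stated objective: simpler
-- what changed: Replaced A's three passes (count words into a defaultdict, enumerate the vocab into the two index dicts, then re-encode every caption with a membership test) by a single pass over the captions that assigns each word an index at its first occurrence (tracked with an 'assigned' set) and encodes it immediately; the word_counts dict, the vocab list and the membership test disappear.
import Mathlib
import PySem

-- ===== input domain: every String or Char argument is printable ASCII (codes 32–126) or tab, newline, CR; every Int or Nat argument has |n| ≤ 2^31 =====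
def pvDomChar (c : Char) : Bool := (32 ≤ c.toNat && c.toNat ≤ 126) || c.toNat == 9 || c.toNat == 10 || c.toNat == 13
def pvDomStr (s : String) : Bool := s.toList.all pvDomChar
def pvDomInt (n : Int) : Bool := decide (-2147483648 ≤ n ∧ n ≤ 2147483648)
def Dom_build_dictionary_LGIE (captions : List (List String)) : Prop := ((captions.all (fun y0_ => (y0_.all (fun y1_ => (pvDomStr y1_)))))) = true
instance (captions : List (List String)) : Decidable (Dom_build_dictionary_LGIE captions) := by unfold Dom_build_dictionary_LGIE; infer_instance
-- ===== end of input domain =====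

-- B builds the vocabulary and the encoded captions in one single pass (first-occurrence
-- assignment with an 'assigned' set) instead of A's three passes (count, enumerate vocab,
-- re-encode); objective: simpler, same asymptotic cost.

-- ===== PORT A =====
-- word_counts is a defaultdict(float); its counts are exact small integers (0.0, 1.0, …),
-- so they are ported as Int — '+= 1' and '>= 0' are exact on them.
def build_dictionary_LGIE (captions : List (List String)) :
    List (List Int) × (List (Int × String)) × (List (String × Int)) × Int :=
  let word_counts : PySem.Dict String Int :=
    captions.foldl (fun d sent => sent.foldl (fun d w => d.modify w 0 (fun x => x + 1)) d)
      PySem.Dict.empty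
  let vocab : List String :=
    word_counts.keys.filter (fun w => decide (0 ≤ word_counts.getD w 0))
  -- state (wordtoix, ixtoword, ix), assignments in the Python's order
  let st : PySem.Dict String Int × PySem.Dict Int String × Int :=
    vocab.foldl (fun p w => (p.1.insert w p.2.2, p.2.1.insert p.2.2 w, p.2.2 + 1))
      (PySem.Dict.empty.insert "<end>" 0, PySem.Dict.empty.insert 0 "<end>", 1)
  let wordtoix := st.1
  let ixtoword := st.2.1
  let captions_new : List (List Int) :=
    captions.foldl (fun acc t =>
      acc ++ [t.foldl (fun rev w =>
        if wordtoix.contains w then rev ++ [wordtoix.getD w 0] else rev) []]) []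
  (captions_new, ixtoword.items, wordtoix.items, (ixtoword.size : Int))

-- ===== PORT B =====
-- B's per-word step; state = (ixtoword, wordtoix, ix, assigned, rev)
def altStepW (q : PySem.Dict Int String × PySem.Dict String Int × Int × PySem.Set String × List Int)
    (w : String) :
    PySem.Dict Int String × PySem.Dict String Int × Int × PySem.Set String × List Int :=
  if PySem.Set.contains q.2.2.2.1 w then
    (q.1, q.2.1, q.2.2.1, q.2.2.2.1, q.2.2.2.2 ++ [q.2.1.getD w 0])
  else
    (q.1.insert q.2.2.1 w, q.2.1.insert w q.2.2.1, q.2.2.1 + 1, PySem.Set.add q.2.2.2.1 w,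
      q.2.2.2.2 ++ [(q.2.1.insert w q.2.2.1).getD w 0])

-- B's per-sentence step; state = (ixtoword, wordtoix, ix, assigned, captions_new)
def altStepS
    (st : PySem.Dict Int String × PySem.Dict String Int × Int × PySem.Set String × List (List Int))
    (sent : List String) :
    PySem.Dict Int String × PySem.Dict String Int × Int × PySem.Set String × List (List Int) :=
  let r := sent.foldl altStepW (st.1, st.2.1, st.2.2.1, st.2.2.2.1, [])
  (r.1, r.2.1, r.2.2.1, r.2.2.2.1, st.2.2.2.2 ++ [r.2.2.2.2])

def build_dictionary_LGIE_alt (captions : List (List String)) :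
    List (List Int) × (List (Int × String)) × (List (String × Int)) × Int :=
  let st := captions.foldl altStepS
    (PySem.Dict.empty.insert 0 "<end>", PySem.Dict.empty.insert "<end>" 0, 1,
      PySem.Set.empty, [])
  (st.2.2.2.2, st.1.items, st.2.1.items, (st.1.size : Int))

-- ===== PRECONDITION & SPEC =====
def Spec_build_dictionary_LGIE (captions : List (List String)) (out : List (List Int) × (List (Int × String)) × (List (String × Int)) × Int) : Prop := out = build_dictionary_LGIE_alt captions
instance (captions : List (List String)) (out : List (List Int) × (List (Int × String)) × (List (String × Int)) × Int) : Decidable (Spec_build_dictionary_LGIE captions out) := by unfold Spec_build_dictionary_LGIE; infer_instance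

-- ===== CLAIM (what is proved, stated in full; the proofs are below) =====
def Claim_equal_build_dictionary_LGIE : Prop := ∀ (captions : List (List String)), Dom_build_dictionary_LGIE captions → Spec_build_dictionary_LGIE captions (build_dictionary_LGIE captions)

-- ===== LEMMAS AND PROOFS =====

-- the (wordtoix, ixtoword, ix) triple after assigning indices to a word list s
def wstep (p : PySem.Dict String Int × PySem.Dict Int String × Int) (w : String) :
    PySem.Dict String Int × PySem.Dict Int String × Int :=
  (p.1.insert w p.2.2, p.2.1.insert p.2.2 w, p.2.2 + 1)

def W (s : List String) : PySem.Dict String Int × PySem.Dict Int String × Int :=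
  s.foldl wstep (PySem.Dict.empty.insert "<end>" 0, PySem.Dict.empty.insert 0 "<end>", 1)

theorem W_append (s u : List String) : W (s ++ u) = u.foldl wstep (W s) :=
  List.foldl_append

theorem W_singleton (s : List String) (w : String) : W (s ++ [w]) = wstep (W s) w := by
  rw [W_append]; rfl

theorem wd_contains_pres (s : List String) :
    ∀ (p : PySem.Dict String Int × PySem.Dict Int String × Int) (w : String),
    p.1.contains w = true → ((s.foldl wstep p).1).contains w = true := by
  induction s with
  | nil => exact fun _ _ h => h
  | cons x s ih =>
      intro p w h
      exact ih _ w (by simp [wstep, PySem.Dict.contains_insert, h])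

theorem wd_contains_mem (s : List String) :
    ∀ (p : PySem.Dict String Int × PySem.Dict Int String × Int) (w : String),
    w ∈ s → ((s.foldl wstep p).1).contains w = true := by
  induction s with
  | nil => intro _ _ h; cases h
  | cons x s ih =>
      intro p w h
      rcases List.mem_cons.mp h with h | h
      · subst h
        exact wd_contains_pres s _ w (by simp [wstep, PySem.Dict.contains_insert_self])
      · exact ih _ w h

theorem wd_getD_not_mem (s : List String) :
    ∀ (p : PySem.Dict String Int × PySem.Dict Int String × Int) (w : String),
    w ∉ s → ((s.foldl wstep p).1).getD w 0 = p.1.getD w 0 := by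
  induction s with
  | nil => intro _ _ _; rfl
  | cons x s ih =>
      intro p w h
      have hx : w ≠ x := fun he => h (he ▸ List.mem_cons_self)
      have ht : w ∉ s := fun hm => h (List.mem_cons_of_mem _ hm)
      rw [List.foldl_cons, ih _ w ht]
      exact PySem.Dict.getD_insert_of_ne _ _ _ hx

theorem W_contains (s : List String) (w : String) (h : w ∈ s) :
    ((W s).1).contains w = true :=
  wd_contains_mem s _ w h

-- a word already assigned keeps its code when further words are assigned
theorem wd_getD_stable (t : List String) (s : PySem.Set String) (w : String)
    (h : w ∈ s) : ((W (PySem.Set.update s t)).1).getD w 0 = ((W s).1).getD w 0 := by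
  rw [PySem.Set.update_eq_append_filter, W_append]
  apply wd_getD_not_mem
  intro hmem
  have := (List.mem_filter.mp hmem).2
  rw [(PySem.Set.contains_iff s w).mpr h] at this
  simp at this

theorem inner_invariant (sent : List String) (s : PySem.Set String) (rev : List Int) :
    sent.foldl altStepW ((W s).2.1, (W s).1, (W s).2.2, s, rev)
      = ((W (PySem.Set.update s sent)).2.1, (W (PySem.Set.update s sent)).1,
         (W (PySem.Set.update s sent)).2.2, PySem.Set.update s sent,
         rev ++ sent.map (fun w => ((W (PySem.Set.update s sent)).1).getD w 0)) := by
  induction sent generalizing s rev with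
  | nil => simp [PySem.Set.update_nil]
  | cons w sent ih =>
      rw [List.foldl_cons, PySem.Set.update_cons]
      by_cases hw : w ∈ s
      · have hstep : altStepW ((W s).2.1, (W s).1, (W s).2.2, s, rev) w
            = ((W s).2.1, (W s).1, (W s).2.2, s, rev ++ [((W s).1).getD w 0]) := by
          simp [altStepW, hw]
        rw [hstep, ih, PySem.Set.add_of_mem hw]
        have hcode : ((W (PySem.Set.update s sent)).1).getD w 0 = ((W s).1).getD w 0 :=
          wd_getD_stable sent s w hw
        simp [hcode]
      · have hadd : PySem.Set.add s w = s ++ [w] := PySem.Set.add_of_not_mem hw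
        have hW : W (s ++ [w]) = ((W s).1.insert w (W s).2.2,
            (W s).2.1.insert (W s).2.2 w, (W s).2.2 + 1) := W_singleton s w
        have hstep : altStepW ((W s).2.1, (W s).1, (W s).2.2, s, rev) w
            = ((W (s ++ [w])).2.1, (W (s ++ [w])).1, (W (s ++ [w])).2.2, s ++ [w],
               rev ++ [((W (s ++ [w])).1).getD w 0]) := by
          simp [altStepW, hw, hW]
        rw [hstep, hadd, ih]
        have hmem : w ∈ s ++ [w] := by simp
        have hcode : ((W (PySem.Set.update (s ++ [w]) sent)).1).getD w 0
            = ((W (s ++ [w])).1).getD w 0 := wd_getD_stable sent (s ++ [w]) w hmem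
        simp [hcode]

theorem outer_invariant (caps : List (List String)) (s : PySem.Set String)
    (acc : List (List Int)) :
    caps.foldl altStepS ((W s).2.1, (W s).1, (W s).2.2, s, acc)
      = ((W (PySem.Set.update s caps.flatten)).2.1, (W (PySem.Set.update s caps.flatten)).1,
         (W (PySem.Set.update s caps.flatten)).2.2, PySem.Set.update s caps.flatten,
         acc ++ caps.map (fun t =>
           t.map (fun w => ((W (PySem.Set.update s caps.flatten)).1).getD w 0))) := by
  induction caps generalizing s acc with
  | nil => simp [PySem.Set.update_nil]
  | cons t caps ih =>
      rw [List.foldl_cons, List.flatten_cons, PySem.Set.update_append]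
      have hstep : altStepS ((W s).2.1, (W s).1, (W s).2.2, s, acc) t
          = ((W (PySem.Set.update s t)).2.1, (W (PySem.Set.update s t)).1,
             (W (PySem.Set.update s t)).2.2, PySem.Set.update s t,
             acc ++ [t.map (fun w => ((W (PySem.Set.update s t)).1).getD w 0)]) := by
        show (_, _, _, _, acc ++ [_]) = _
        rw [inner_invariant t s []]
        simp
      rw [hstep, ih]
      have hmaps : t.map (fun w => ((W (PySem.Set.update s t)).1).getD w 0)
          = t.map (fun w =>
              ((W (PySem.Set.update (PySem.Set.update s t) caps.flatten)).1).getD w 0) := by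
        apply List.map_congr_left
        intro w hw
        exact (wd_getD_stable caps.flatten (PySem.Set.update s t) w
          ((PySem.Set.mem_update s t w).mpr (Or.inr hw))).symm
      rw [hmaps]
      simp

-- B computes the canonical form
theorem alt_eq (captions : List (List String)) :
    build_dictionary_LGIE_alt captions
      = (captions.map (fun t =>
           t.map (fun w => ((W (PySem.Set.ofList captions.flatten)).1).getD w 0)),
         (W (PySem.Set.ofList captions.flatten)).2.1.items,
         (W (PySem.Set.ofList captions.flatten)).1.items,
         ((W (PySem.Set.ofList captions.flatten)).2.1.size : Int)) := by
  have h := outer_invariant captions PySem.Set.empty []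
  rw [show PySem.Set.update PySem.Set.empty captions.flatten
        = PySem.Set.ofList captions.flatten from PySem.Set.update_nil_left _] at h
  simp only [build_dictionary_LGIE_alt]
  rw [show (PySem.Dict.empty.insert (0 : Int) "<end>", PySem.Dict.empty.insert "<end>" (0 : Int),
        (1 : Int), (PySem.Set.empty : PySem.Set String), ([] : List (List Int)))
      = ((W PySem.Set.empty).2.1, (W PySem.Set.empty).1, (W PySem.Set.empty).2.2,
        (PySem.Set.empty : PySem.Set String), ([] : List (List Int))) from rfl, h]
  simp

-- A computes the canonical form
theorem a_eq (captions : List (List String)) :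
    build_dictionary_LGIE captions
      = (captions.map (fun t =>
           t.map (fun w => ((W (PySem.Set.ofList captions.flatten)).1).getD w 0)),
         (W (PySem.Set.ofList captions.flatten)).2.1.items,
         (W (PySem.Set.ofList captions.flatten)).1.items,
         ((W (PySem.Set.ofList captions.flatten)).2.1.size : Int)) := by
  simp only [build_dictionary_LGIE]
  have hcounts : captions.foldl
      (fun d sent => sent.foldl (fun d w => d.modify w 0 (fun x => x + 1)) d) PySem.Dict.empty
      = PySem.Dict.counter captions.flatten := by
    rw [PySem.Dict.counter_eq_foldl, List.foldl_flatten]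
  rw [hcounts]
  have hvocab : (PySem.Dict.counter captions.flatten).keys.filter
      (fun w => decide (0 ≤ (PySem.Dict.counter captions.flatten).getD w 0))
      = PySem.Set.ofList captions.flatten := by
    rw [List.filter_eq_self.mpr, PySem.Dict.keys_counter]
    intro w _
    simp [PySem.Dict.getD_counter]
  rw [hvocab]
  rw [show (PySem.Set.ofList captions.flatten).foldl
        (fun p w => (p.1.insert w p.2.2, p.2.1.insert p.2.2 w, p.2.2 + 1))
        (PySem.Dict.empty.insert "<end>" 0, PySem.Dict.empty.insert 0 "<end>", 1)
      = W (PySem.Set.ofList captions.flatten) from rfl]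
  have henc : ∀ t ∈ captions,
      t.foldl (fun rev w =>
        if ((W (PySem.Set.ofList captions.flatten)).1).contains w then
          rev ++ [((W (PySem.Set.ofList captions.flatten)).1).getD w 0] else rev) []
      = t.map (fun w => ((W (PySem.Set.ofList captions.flatten)).1).getD w 0) := by
    intro t ht
    rw [PySem.List.foldl_congr_mem t _
      (fun rev w => rev ++ [((W (PySem.Set.ofList captions.flatten)).1).getD w 0]) []
      (fun rev w hw => by
        have hmem : w ∈ PySem.Set.ofList captions.flatten :=
          (PySem.Set.mem_ofList _ _).mpr (List.mem_flatten.mpr ⟨t, ht, hw⟩)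
        simp [W_contains _ _ hmem])]
    exact PySem.List.foldl_append_singleton_eq_map _ t []
  rw [PySem.List.foldl_congr_mem captions _
    (fun acc t => acc ++ [t.map (fun w => ((W (PySem.Set.ofList captions.flatten)).1).getD w 0)]) []
    (fun acc t ht => by rw [henc t ht])]
  rw [PySem.List.foldl_append_singleton_eq_map _ captions []]
  simp

-- ===== VERDICT (by name: the statement is the Claim_ definition above) =====
theorem build_dictionary_LGIE_spec : Claim_equal_build_dictionary_LGIE := by
  intro captions _
  unfold Spec_build_dictionary_LGIE
  rw [a_eq, alt_eq]
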